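-- pv_equiv track=rewrite | github.com/bellan/VVXAnalysis | TreeAnalysis/python/CrossCheck.py | channelsZL
-- ===== SOURCE A (Python) =====
-- from operator import itemgetter
--
-- def channelsZL(listIn):
--     iseee = False
--     iseem = False
--     ismmm = False
--     ismme = False
--     eee = []
--     eem = []
--     mmm = []
--     mme = []
--     lll = []
--
--     for i,evlist in enumerate(listIn):
--         ev = evlist.split(":")
--         if  not ev or ev[0]=="" or ev[0]=="#" or ev[0]=="\n": continue
--         if    ev[3] == "eee":  eee.append(ev)
--         elif  ev[3] == "eem":  eem.append(ev)
--         elif  ev[3] == "mmm":  mmm.append(ev)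
--         elif  ev[3] == "mme":  mme.append(ev)
--         lll.append(ev)
--
--     eee=sorted(eee, key=itemgetter(2))
--     eee=sorted(eee, key=itemgetter(1))
--     eee=sorted(eee, key=itemgetter(0))
--
--     eem=sorted(eem, key=itemgetter(2))
--     eem=sorted(eem, key=itemgetter(1))
--     eem=sorted(eem, key=itemgetter(0))
--
--     mmm=sorted(mmm, key=itemgetter(2))
--     mmm=sorted(mmm, key=itemgetter(1))
--     mmm=sorted(mmm, key=itemgetter(0))
--
--     mme=sorted(mme, key=itemgetter(2))
--     mme=sorted(mme, key=itemgetter(1))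
--     mme=sorted(mme, key=itemgetter(0))
--
--     lll=sorted(lll, key=itemgetter(2))
--     lll=sorted(lll, key=itemgetter(1))
--     lll=sorted(lll, key=itemgetter(0))
--
--     return eee,eem,mmm,mme,lll
-- ===== SOURCE B (Python) =====
-- from operator import itemgetter
--
-- def channelsZL(listIn):
--     events = []
--     for evlist in listIn:
--         ev = evlist.split(":")
--         if not ev or ev[0] == "" or ev[0] == "#" or ev[0] == "\n":
--             continue
--         events.append(ev)
--     lll = sorted(events, key=itemgetter(0, 1, 2))
--     eee = [ev for ev in lll if ev[3] == "eee"]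
--     eem = [ev for ev in lll if ev[3] == "eem"]
--     mmm = [ev for ev in lll if ev[3] == "mmm"]
--     mme = [ev for ev in lll if ev[3] == "mme"]
--     return eee, eem, mmm, mme, lll
-- ===== Notes on version B (the rewrite author's own statement) =====
-- stated objective: alternative
-- what changed: A routes each event into one of five lists while scanning and then runs three cascaded single-key stable sorts on every one of the five lists (15 sort passes); B collects all events in one pass, sorts the combined list once with the compound key itemgetter(0,1,2), and obtains the four channel lists as filters of that already-sorted list (filtering commutes with a stable sort).
import Mathlib
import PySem

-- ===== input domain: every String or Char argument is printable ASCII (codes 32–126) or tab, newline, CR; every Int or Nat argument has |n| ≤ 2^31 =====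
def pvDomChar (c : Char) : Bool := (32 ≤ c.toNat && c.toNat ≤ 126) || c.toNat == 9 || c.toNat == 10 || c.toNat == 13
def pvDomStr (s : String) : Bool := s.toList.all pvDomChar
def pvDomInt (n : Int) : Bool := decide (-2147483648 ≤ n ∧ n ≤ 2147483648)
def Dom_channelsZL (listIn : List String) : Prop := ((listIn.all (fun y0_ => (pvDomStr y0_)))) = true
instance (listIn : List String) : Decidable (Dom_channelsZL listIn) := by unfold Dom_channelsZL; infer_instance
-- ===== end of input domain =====

-- B replaces A's five per-channel triple sorts by ONE compound-key sort of the collected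
-- events followed by four filtering passes (objective: alternative decomposition / fewer sorts).

-- shared helpers: both Pythons contain the identical `evlist.split(":")` and skip guard
def pvSplit (s : String) : List String := (PySem.Str.split? s ":").getD []   -- sep ":" ≠ "", so split? is never none
def pvSkip (ev : List String) : Bool :=
  decide (ev = [] ∨ PySem.List.pyGetD ev 0 "" = "" ∨ PySem.List.pyGetD ev 0 "" = "#" ∨ PySem.List.pyGetD ev 0 "" = "\n")
def pvKey (k : Nat) (ev : List String) : String := PySem.List.pyGetD ev (k : Int) ""
  -- ev[k]; in range on every event Pre_ admits (4 ≤ length), so the "" default is never used there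

-- ===== PORT A =====
def pvT5 : Type := List (List String) × List (List String) × List (List String) × List (List String) × List (List String)
def pvStepA (st : pvT5) (evlist : String) : pvT5 :=
  let ev := pvSplit evlist
  if pvSkip ev then st
  else
    let st1 : pvT5 :=
      if pvKey 3 ev = "eee" then (st.1 ++ [ev], st.2.1, st.2.2.1, st.2.2.2.1, st.2.2.2.2)
      else if pvKey 3 ev = "eem" then (st.1, st.2.1 ++ [ev], st.2.2.1, st.2.2.2.1, st.2.2.2.2)
      else if pvKey 3 ev = "mmm" then (st.1, st.2.1, st.2.2.1 ++ [ev], st.2.2.2.1, st.2.2.2.2)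
      else if pvKey 3 ev = "mme" then (st.1, st.2.1, st.2.2.1, st.2.2.2.1 ++ [ev], st.2.2.2.2)
      else st
    (st1.1, st1.2.1, st1.2.2.1, st1.2.2.2.1, st1.2.2.2.2 ++ [ev])
-- the three cascaded single-key sorts A applies to each of its five lists
def pvSort3 (L : List (List String)) : List (List String) :=
  PySem.List.sorted (PySem.List.sorted (PySem.List.sorted L (pvKey 2) false) (pvKey 1) false) (pvKey 0) false
def channelsZL (listIn : List String) : List (List String) × List (List String) × List (List String) × List (List String) × List (List String) :=
  let st := listIn.foldl pvStepA ([], [], [], [], [])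
  (pvSort3 st.1, pvSort3 st.2.1, pvSort3 st.2.2.1, pvSort3 st.2.2.2.1, pvSort3 st.2.2.2.2)

-- ===== PORT B =====
-- itemgetter(0,1,2): Python compares the 3-tuples lexicographically; equal-length
-- List String values compare by exactly that lexicographic order in Mathlib
def pvKey3 (ev : List String) : List String := [pvKey 0 ev, pvKey 1 ev, pvKey 2 ev]
def channelsZL_alt (listIn : List String) : List (List String) × List (List String) × List (List String) × List (List String) × List (List String) :=
  let events := listIn.foldl (fun acc s => let ev := pvSplit s; if pvSkip ev then acc else acc ++ [ev]) []
  let lll := PySem.List.sorted events pvKey3 false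
  (lll.filter (fun ev => decide (pvKey 3 ev = "eee")),
   lll.filter (fun ev => decide (pvKey 3 ev = "eem")),
   lll.filter (fun ev => decide (pvKey 3 ev = "mmm")),
   lll.filter (fun ev => decide (pvKey 3 ev = "mme")),
   lll)

-- ===== PRECONDITION & SPEC =====
-- Pre_ excludes exactly the inputs where A raises IndexError: a line whose ':'-split is not
-- skipped by the guard (first field not "", "#" or "\n") yet has fewer than 4 fields (ev[3]).
def Pre_channelsZL (listIn : List String) : Prop :=
  ∀ s ∈ listIn,
    PySem.List.pyGetD ((PySem.Str.split? s ":").getD []) 0 "" = "" ∨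
    PySem.List.pyGetD ((PySem.Str.split? s ":").getD []) 0 "" = "#" ∨
    PySem.List.pyGetD ((PySem.Str.split? s ":").getD []) 0 "" = "\n" ∨
    4 ≤ ((PySem.Str.split? s ":").getD []).length
instance (listIn : List String) : Decidable (Pre_channelsZL listIn) := by unfold Pre_channelsZL; infer_instance
def pvWitness_channelsZL : List String := ["5:1:2:eee", "4:2:1:mme", "#", "4:2:1:mmm:x"]
def Spec_channelsZL (listIn : List String) (out : List (List String) × List (List String) × List (List String) × List (List String) × List (List String)) : Prop := out = channelsZL_alt listIn
instance (listIn : List String) (out : List (List String) × List (List String) × List (List String) × List (List String) × List (List String)) : Decidable (Spec_channelsZL listIn out) := by unfold Spec_channelsZL; infer_instance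

-- ===== CLAIM (what is proved, stated in full; the proofs are below) =====
def Claim_equal_channelsZL : Prop := ∀ (listIn : List String), Dom_channelsZL listIn → Pre_channelsZL listIn → Spec_channelsZL listIn (channelsZL listIn)

-- ===== LEMMAS AND PROOFS =====

-- strict and weak (ties-before) insertion predicates for a key
def pvS {α κ : Type} [LinearOrder κ] (f : α → κ) : α → α → Bool := fun a b => decide (f a < f b)
def pvW {α κ : Type} [LinearOrder κ] (f : α → κ) : α → α → Bool := fun a b => decide (f a ≤ f b)

-- the events both loops collect, as a filtered map
def pvEvs (listIn : List String) : List (List String) :=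
  (listIn.map pvSplit).filter (fun ev => !pvSkip ev)

-- inserting before the whole list when the predicate accepts every element
theorem pv_insert_head {α : Type} (b : α → α → Bool) (x : α) (zs : List α)
    (h : ∀ z ∈ zs, b x z = true) : PySem.List.insertBy b x zs = x :: zs := by
  cases zs with
  | nil => rfl
  | cons z t => simp [PySem.List.insertBy, h z (List.mem_cons_self)]

-- a strict (after-ties) insertion commutes with a weak (before-ties) insertion
theorem pv_comm_SW {α κ : Type} [LinearOrder κ] (f : α → κ) (z x : α) (w : List α) :
    PySem.List.insertBy (pvS f) z (PySem.List.insertBy (pvW f) x w)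
      = PySem.List.insertBy (pvW f) x (PySem.List.insertBy (pvS f) z w) := by
  induction w with
  | nil =>
      simp only [PySem.List.insertBy, pvS, pvW]
      rcases le_or_gt (f x) (f z) with h | h
      · simp [h, not_lt.mpr h]
      · simp [h, not_le.mpr h]
  | cons e w ih =>
      simp only [PySem.List.insertBy, pvS, pvW]
      by_cases hxe : f x ≤ f e <;> by_cases hze : f z < f e
      · -- both insert at head
        rcases le_or_gt (f x) (f z) with h | h
        · simp [PySem.List.insertBy, pvS, pvW, hxe, hze, h, not_lt.mpr h]
        · simp [PySem.List.insertBy, pvS, pvW, hxe, hze, not_le.mpr h]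
      · -- x at head, z recurses: f e ≤ f z, f x ≤ f e so ¬ f z < f x
        have hzx : ¬ f z < f x := not_lt.mpr (le_trans hxe (not_lt.mp hze))
        simp [PySem.List.insertBy, pvS, pvW, hxe, hze, hzx]
      · -- z at head: f z < f e, ¬ f x ≤ f e so f e < f x, hence ¬ f x ≤ f z
        have hxz : ¬ f x ≤ f z := fun hc => hxe (le_trans hc (le_of_lt hze))
        simp [PySem.List.insertBy, pvS, pvW, hxe, hze, hxz]
      · simp [PySem.List.insertBy, pvS, pvW, hxe, hze, ih]

theorem pv_foldl_insW {α κ : Type} [LinearOrder κ] (f : α → κ) (x : α) (zs : List α) :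
    ∀ acc : List α,
    zs.foldl (fun w z => PySem.List.insertBy (pvS f) z w) (PySem.List.insertBy (pvW f) x acc)
      = PySem.List.insertBy (pvW f) x (zs.foldl (fun w z => PySem.List.insertBy (pvS f) z w) acc) := by
  induction zs with
  | nil => intro acc; rfl
  | cons z zs ih => intro acc; simp only [List.foldl_cons, pv_comm_SW, ih]

-- stable insertion sort of a cons: the head goes in BEFORE its key-ties
theorem pv_sorted_cons {α κ : Type} [LinearOrder κ] (f : α → κ) (x : α) (zs : List α) :
    PySem.List.sorted (x :: zs) f false = PySem.List.insertBy (pvW f) x (PySem.List.sorted zs f false) := by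
  rw [PySem.List.sorted_eq_foldl_insertBy, PySem.List.sorted_eq_foldl_insertBy, List.foldl_cons]
  have h0 : PySem.List.insertBy (fun a b => decide (f a < f b)) x ([] : List α)
      = PySem.List.insertBy (pvW f) x [] := rfl
  rw [h0]
  exact pv_foldl_insW f x zs []

theorem pv_insert_congr {α : Type} (b1 b2 : α → α → Bool) (x : α) (zs : List α)
    (h : ∀ z ∈ zs, b1 x z = b2 x z) : PySem.List.insertBy b1 x zs = PySem.List.insertBy b2 x zs := by
  induction zs with
  | nil => rfl
  | cons z t ih =>
      simp only [PySem.List.insertBy, h z (List.mem_cons_self)]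
      by_cases hb : b2 x z = true
      · simp [hb]
      · simp only [hb, if_neg, Bool.not_eq_true] at *
        simp [ih (fun y hy => h y (List.mem_cons_of_mem _ hy))]

theorem pv_pairwise_insert {α κ : Type} [LinearOrder κ] (g : α → κ) (x : α) (ys : List α)
    (h : ys.Pairwise (fun a b => g a ≤ g b)) :
    (PySem.List.insertBy (pvS g) x ys).Pairwise (fun a b => g a ≤ g b) := by
  induction ys with
  | nil => simp [PySem.List.insertBy]
  | cons y t ih =>
      rcases List.pairwise_cons.mp h with ⟨hy, ht⟩
      by_cases hxy : g x < g y
      · have : PySem.List.insertBy (pvS g) x (y :: t) = x :: y :: t := by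
          simp [PySem.List.insertBy, pvS, hxy]
        rw [this]
        exact List.pairwise_cons.mpr ⟨by
          intro z hz
          rcases List.mem_cons.mp hz with rfl | hz
          · exact le_of_lt hxy
          · exact le_trans (le_of_lt hxy) (hy z hz), h⟩
      · have : PySem.List.insertBy (pvS g) x (y :: t) = y :: PySem.List.insertBy (pvS g) x t := by
          simp [PySem.List.insertBy, pvS, hxy]
        rw [this]
        refine List.pairwise_cons.mpr ⟨?_, ih ht⟩
        intro z hz
        rcases (PySem.List.mem_insertBy _ _ _ _).mp hz with rfl | hz
        · exact not_lt.mp hxy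
        · exact hy z hz

-- weak f-insertion of y commutes with lex-insertion of x when g y ≤ g x
theorem pv_comm_WK {α κ1 κ2 κ3 : Type} [LinearOrder κ1] [LinearOrder κ2] [LinearOrder κ3]
    (f : α → κ1) (g : α → κ2) (K : α → κ3)
    (hK : ∀ a b, K a < K b ↔ f a < f b ∨ (f a = f b ∧ g a < g b))
    (x y : α) (hgy : g y ≤ g x) (w : List α) :
    PySem.List.insertBy (pvW f) y (PySem.List.insertBy (pvS K) x w)
      = PySem.List.insertBy (pvS K) x (PySem.List.insertBy (pvW f) y w) := by
  have hKxy : (decide (K x < K y)) = decide (f x < f y) := by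
    apply decide_eq_decide.mpr
    rw [hK]
    constructor
    · rintro (h | ⟨he, hg⟩)
      · exact h
      · exact absurd hg (not_lt.mpr hgy)
    · exact Or.inl
  induction w with
  | nil =>
      simp only [PySem.List.insertBy, pvS, pvW, hKxy]
      rcases le_or_gt (f y) (f x) with h | h
      · simp [h, not_lt.mpr h]
      · simp [not_le.mpr h, h]
  | cons e w ih =>
      simp only [PySem.List.insertBy, pvS, pvW]
      by_cases hKe : K x < K e <;> by_cases hW : f y ≤ f e
      · -- both insert before e
        rcases le_or_gt (f y) (f x) with h | h
        · simp [PySem.List.insertBy, pvS, pvW, hKe, hW, h, hKxy, not_lt.mpr h]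
        · simp [PySem.List.insertBy, pvS, pvW, hKe, hW, hKxy, h, not_le.mpr h]
      · -- x at head, y recurses: f x ≤ f e < f y
        have hxe : f x ≤ f e := by
          rcases (hK x e).mp hKe with h | ⟨h, _⟩
          · exact le_of_lt h
          · exact le_of_eq h
        have hyx : ¬ f y ≤ f x := fun hc => hW (le_trans hc hxe)
        simp [PySem.List.insertBy, pvS, pvW, hKe, hW, hyx]
      · -- y at head, x recurses: f y ≤ f e ≤ f x (lex-negation), so ¬ K x y
        have hex : f e ≤ f x := le_of_not_gt (fun hc => hKe ((hK x e).mpr (Or.inl hc)))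
        have hnK : ¬ (f x < f y) := not_lt.mpr (le_trans hW hex)
        simp [PySem.List.insertBy, pvS, pvW, hKe, hW, hKxy, hnK]
      · simp [PySem.List.insertBy, pvS, pvW, hKe, hW, ih]

-- the crux: f-sorting after a stable g-insertion = lex-(f,g)-insertion into the f-sort
theorem pv_sort_insert {α κ1 κ2 κ3 : Type} [LinearOrder κ1] [LinearOrder κ2] [LinearOrder κ3]
    (f : α → κ1) (g : α → κ2) (K : α → κ3)
    (hK : ∀ a b, K a < K b ↔ f a < f b ∨ (f a = f b ∧ g a < g b))
    (x : α) (ys : List α)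
    (h : ys.Pairwise (fun a b => g a ≤ g b)) :
    PySem.List.sorted (PySem.List.insertBy (pvS g) x ys) f false
      = PySem.List.insertBy (pvS K) x (PySem.List.sorted ys f false) := by
  induction ys with
  | nil => rfl
  | cons y t ih =>
      rcases List.pairwise_cons.mp h with ⟨hy, ht⟩
      by_cases hg : g x < g y
      · have he : PySem.List.insertBy (pvS g) x (y :: t) = x :: y :: t := by
          simp [PySem.List.insertBy, pvS, hg]
        rw [he, pv_sorted_cons]
        apply pv_insert_congr
        intro z hz
        have hz' : z ∈ y :: t := (PySem.List.mem_sorted _ _ _ _).mp hz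
        have hgz : g x < g z := by
          rcases List.mem_cons.mp hz' with rfl | hz''
          · exact hg
          · exact lt_of_lt_of_le hg (hy z hz'')
        apply decide_eq_decide.mpr
        rw [hK]
        constructor
        · intro hle
          rcases lt_or_eq_of_le hle with h' | h'
          · exact Or.inl h'
          · exact Or.inr ⟨h', hgz⟩
        · rintro (h' | ⟨h', _⟩)
          · exact le_of_lt h'
          · exact le_of_eq h'
      · have he : PySem.List.insertBy (pvS g) x (y :: t) = y :: PySem.List.insertBy (pvS g) x t := by
          simp [PySem.List.insertBy, pvS, hg]
        rw [he, pv_sorted_cons, ih ht, pv_comm_WK f g K hK x y (not_lt.mp hg), ← pv_sorted_cons]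

theorem pv_sort_sort_aux {α κ1 κ2 κ3 : Type} [LinearOrder κ1] [LinearOrder κ2] [LinearOrder κ3]
    (f : α → κ1) (g : α → κ2) (K : α → κ3)
    (hK : ∀ a b, K a < K b ↔ f a < f b ∨ (f a = f b ∧ g a < g b))
    (xs : List α) :
    ∀ acc : List α, acc.Pairwise (fun a b => g a ≤ g b) →
    PySem.List.sorted (xs.foldl (fun w z => PySem.List.insertBy (pvS g) z w) acc) f false
      = xs.foldl (fun w z => PySem.List.insertBy (pvS K) z w)
          (PySem.List.sorted acc f false) := by
  induction xs with
  | nil => intro acc _; rfl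
  | cons x xs ih =>
      intro acc hacc
      simp only [List.foldl_cons]
      rw [ih _ (pv_pairwise_insert g x acc hacc), pv_sort_insert f g K hK x acc hacc]

-- two cascaded stable sorts = one stable sort by the lexicographic pair key
theorem pv_sort_sort {α κ1 κ2 κ3 : Type} [LinearOrder κ1] [LinearOrder κ2] [LinearOrder κ3]
    (f : α → κ1) (g : α → κ2) (K : α → κ3)
    (hK : ∀ a b, K a < K b ↔ f a < f b ∨ (f a = f b ∧ g a < g b))
    (xs : List α) :
    PySem.List.sorted (PySem.List.sorted xs g false) f false
      = PySem.List.sorted xs K false := by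
  rw [PySem.List.sorted_eq_foldl_insertBy xs g, PySem.List.sorted_eq_foldl_insertBy xs K]
  exact pv_sort_sort_aux f g K hK xs [] List.Pairwise.nil

theorem pv_filter_insW_pos {α κ : Type} [LinearOrder κ] (f : α → κ) (p : α → Bool) (x : α)
    (w : List α) (hw : w.Pairwise (fun a b => f a ≤ f b)) (hx : p x = true) :
    (PySem.List.insertBy (pvW f) x w).filter p = PySem.List.insertBy (pvW f) x (w.filter p) := by
  induction w with
  | nil => simp [PySem.List.insertBy, hx]
  | cons y t ih =>
      rcases List.pairwise_cons.mp hw with ⟨hy, ht⟩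
      by_cases hxy : f x ≤ f y
      · have he : PySem.List.insertBy (pvW f) x (y :: t) = x :: y :: t := by
          simp [PySem.List.insertBy, pvW, hxy]
        rw [he]
        by_cases hpy : p y = true
        · simp [hx, hpy, PySem.List.insertBy, pvW, hxy]
        · simp only [List.filter_cons, hx, hpy, if_pos, Bool.false_eq_true]
          rw [pv_insert_head]
          intro z hz
          have hz' : z ∈ t := List.mem_of_mem_filter hz
          exact decide_eq_true (le_trans hxy (hy z hz'))
      · have he : PySem.List.insertBy (pvW f) x (y :: t) = y :: PySem.List.insertBy (pvW f) x t := by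
          simp [PySem.List.insertBy, pvW, hxy]
        rw [he]
        by_cases hpy : p y = true
        · have : PySem.List.insertBy (pvW f) x ((y :: t).filter p)
              = y :: PySem.List.insertBy (pvW f) x (t.filter p) := by
            simp [hpy, PySem.List.insertBy, pvW, hxy]
          rw [this]
          simp [hpy, ih ht]
        · simp [hpy, ih ht]

theorem pv_filter_insW_neg {α κ : Type} [LinearOrder κ] (f : α → κ) (p : α → Bool) (x : α)
    (w : List α) (hx : p x = false) :
    (PySem.List.insertBy (pvW f) x w).filter p = w.filter p := by
  induction w with
  | nil => simp [PySem.List.insertBy, hx]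
  | cons y t ih =>
      by_cases hxy : (pvW f) x y = true
      · simp [PySem.List.insertBy, hxy, List.filter_cons, hx]
      · simp only [PySem.List.insertBy, hxy, Bool.false_eq_true] at *
        simp [List.filter_cons, ih]

-- filtering commutes with a stable sort
theorem pv_filter_sorted {α κ : Type} [LinearOrder κ] (f : α → κ) (p : α → Bool) (xs : List α) :
    (PySem.List.sorted xs f false).filter p = PySem.List.sorted (xs.filter p) f false := by
  induction xs with
  | nil => rfl
  | cons x xs ih =>
      rw [pv_sorted_cons]
      by_cases hp : p x = true
      · rw [pv_filter_insW_pos f p x _ (PySem.List.sorted_pairwise xs f) hp, ih]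
        simp [hp, pv_sorted_cons]
      · rw [pv_filter_insW_neg f p x _ (by simpa using hp), ih]
        simp [hp]

-- B's collection loop
theorem pv_loopB (listIn : List String) (acc : List (List String)) :
    listIn.foldl (fun acc s => let ev := pvSplit s; if pvSkip ev then acc else acc ++ [ev]) acc
      = acc ++ pvEvs listIn := by
  induction listIn generalizing acc with
  | nil => simp [pvEvs]
  | cons s rest ih =>
      simp only [List.foldl_cons]
      by_cases hs : pvSkip (pvSplit s) = true
      · simp [hs, ih, pvEvs]
      · simp only [Bool.not_eq_true] at hs
        simp [hs, ih, pvEvs]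

-- A's routing loop: each channel accumulator is a filter of the collected events
theorem pv_loopA (listIn : List String) (a b c d e : List (List String)) :
    listIn.foldl pvStepA (a, b, c, d, e)
      = (a ++ (pvEvs listIn).filter (fun ev => decide (pvKey 3 ev = "eee")),
         b ++ (pvEvs listIn).filter (fun ev => decide (pvKey 3 ev = "eem")),
         c ++ (pvEvs listIn).filter (fun ev => decide (pvKey 3 ev = "mmm")),
         d ++ (pvEvs listIn).filter (fun ev => decide (pvKey 3 ev = "mme")),
         e ++ pvEvs listIn) := by
  induction listIn generalizing a b c d e with
  | nil => simp [pvEvs]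
  | cons s rest ih =>
      simp only [List.foldl_cons]
      by_cases hs : pvSkip (pvSplit s) = true
      · have hstep : pvStepA (a, b, c, d, e) s = (a, b, c, d, e) := by
          simp [pvStepA, hs]
        rw [hstep, ih]
        simp [pvEvs, hs]
      · have hEvs : pvEvs (s :: rest) = pvSplit s :: pvEvs rest := by
          simp [pvEvs, hs]
        simp only [Bool.not_eq_true] at hs
        by_cases h1 : pvKey 3 (pvSplit s) = "eee"
        · have hstep : pvStepA (a, b, c, d, e) s = (a ++ [pvSplit s], b, c, d, e ++ [pvSplit s]) := by
            simp [pvStepA, hs, h1]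
          rw [hstep, ih, hEvs]
          simp [h1]
        · by_cases h2 : pvKey 3 (pvSplit s) = "eem"
          · have hstep : pvStepA (a, b, c, d, e) s = (a, b ++ [pvSplit s], c, d, e ++ [pvSplit s]) := by
              simp [pvStepA, hs, h2]
            rw [hstep, ih, hEvs]
            simp [h2]
          · by_cases h3 : pvKey 3 (pvSplit s) = "mmm"
            · have hstep : pvStepA (a, b, c, d, e) s = (a, b, c ++ [pvSplit s], d, e ++ [pvSplit s]) := by
                simp [pvStepA, hs, h3]
              rw [hstep, ih, hEvs]
              simp [h3]
            · by_cases h4 : pvKey 3 (pvSplit s) = "mme"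
              · have hstep : pvStepA (a, b, c, d, e) s = (a, b, c, d ++ [pvSplit s], e ++ [pvSplit s]) := by
                  simp [pvStepA, hs, h4]
                rw [hstep, ih, hEvs]
                simp [h4]
              · have hstep : pvStepA (a, b, c, d, e) s = (a, b, c, d, e ++ [pvSplit s]) := by
                  simp [pvStepA, hs, h1, h2, h3, h4]
                rw [hstep, ih, hEvs]
                simp [h1, h2, h3, h4]

-- the core List LT/DecidableLT instances the ports elaborate with compute the same
-- sort as the Mathlib LinearOrder instances the lemmas above are stated with
theorem pv_sorted_instEq (xs : List (List String)) (key : List String → List String) :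
    @PySem.List.sorted _ _ List.instLT (fun a b => a.decidableLT b) xs key false
      = @PySem.List.sorted _ _ instDistribLatticeOfLinearOrder.toSemilatticeInf.toLT
          LinearOrder.toDecidableLT xs key false := by
  congr 1

-- A's three cascaded sorts are the single compound lex sort B performs
theorem pv_sort3_eq (L : List (List String)) :
    pvSort3 L = PySem.List.sorted L pvKey3 false := by
  unfold pvSort3
  rw [pv_sort_sort (pvKey 1) (pvKey 2) (fun ev => [pvKey 1 ev, pvKey 2 ev])
        (by intro a b; simp [List.cons_lt_cons_iff]) L,
      pv_sort_sort (pvKey 0) (fun ev => [pvKey 1 ev, pvKey 2 ev]) pvKey3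
        (by intro a b; simp [pvKey3, List.cons_lt_cons_iff]) L]
  exact (pv_sorted_instEq L pvKey3).symm

-- ===== VERDICT (by name: the statement is the Claim_ definition above) =====
theorem channelsZL_spec : Claim_equal_channelsZL := by
  intro listIn _ _
  unfold Spec_channelsZL channelsZL channelsZL_alt
  rw [pv_loopA, pv_loopB]
  simp only [List.nil_append, pv_sort3_eq]
  refine congrArg₂ _ ?_ (congrArg₂ _ ?_ (congrArg₂ _ ?_ (congrArg₂ _ ?_ rfl))) <;>
    rw [pv_sorted_instEq, pv_sorted_instEq] <;> exact (pv_filter_sorted pvKey3 _ _).symm
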